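-- pv_equiv track=rewrite | github.com/PKU-Alignment/align-anything | align_anything/utils/utils/convert_bpe_dictionary_to_json.py | insert_hyphens
-- ===== SOURCE A (Python) =====
-- action_atoms = ['m', 'r', 'l', 'rs', 'ls', 'end', 'b']
--
-- def insert_hyphens(key):
--     # Start with the longest matches to avoid misinterpreting substrings
--     i = 0
--     result = []
--     while i < len(key):
--         # Check for two-character atoms first ('rs' and 'ls')
--         if key[i : i + 2] in action_atoms:
--             result.append(key[i : i + 2] + '-')
--             i += 2  # Move past the two characters
--         elif key[i] in action_atoms:
--             result.append(key[i] + '-')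
--             i += 1  # Move past the single character
--         else:
--             i += 1  # Move past unrecognized characters
--     return ''.join(result).rstrip('-')  # Join all parts and remove trailing dash
-- ===== SOURCE B (Python) =====
-- def insert_hyphens(key):
--     # Single pass, no lookahead: emit one-char atoms as tokens; an 's' directly
--     # after an emitted 'r'/'l' upgrades that token in place to 'rs'/'ls'.
--     # Join tokens with '-' instead of appending dashes and stripping the last one.
--     tokens = []
--     last = -2  # index of the most recently emitted 'r'/'l' token
--     for i, c in enumerate(key):
--         if c == 's' and i - 1 == last:
--             tokens[-1] += 's'
--         elif c in 'mrlb':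
--             tokens.append(c)
--             if c in 'rl':
--                 last = i
--     return '-'.join(tokens)
-- ===== Notes on version B (the rewrite author's own statement) =====
-- stated objective: alternative
-- what changed: Replaces A's index-advancing lookahead scan (slice key[i:i+2], membership test against the atom list, append token+'-', final rstrip('-')) by a single char-by-char pass with no lookahead and no slicing that emits one-char atoms and merges a following 's' into the previously emitted 'r'/'l' token in place, joining the token list with '-'.
import Mathlib
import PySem

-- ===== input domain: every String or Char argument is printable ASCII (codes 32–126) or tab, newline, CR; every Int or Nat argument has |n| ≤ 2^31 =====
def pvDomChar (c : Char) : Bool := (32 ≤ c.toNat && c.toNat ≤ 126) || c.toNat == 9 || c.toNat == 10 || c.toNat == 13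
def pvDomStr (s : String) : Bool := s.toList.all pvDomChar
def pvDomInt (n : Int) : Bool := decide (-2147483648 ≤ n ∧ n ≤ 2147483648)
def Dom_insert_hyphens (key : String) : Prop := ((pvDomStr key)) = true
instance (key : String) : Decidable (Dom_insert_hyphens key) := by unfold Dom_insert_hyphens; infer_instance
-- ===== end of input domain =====

-- B replaces A's lookahead slice-and-append scan + rstrip by a single char-by-char pass (no slicing) that
-- merges an 's' into the previously emitted 'r'/'l' token and joins tokens with '-' (objective: alternative).

-- ===== PORT A =====
-- action_atoms, ported as lists of code points (strings handled on the List Char side)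
def action_atoms : List (List Char) :=
  [['m'], ['r'], ['l'], ['r','s'], ['l','s'], ['e','n','d'], ['b']]

-- the while-loop: structural recursion on the suffix key[i:]; key[i:i+2] = c :: rest.take 1
def goA : List Char → List (List Char)
  | [] => []
  | c :: rest =>
    let two := c :: rest.take 1
    if two ∈ action_atoms then
      (two ++ ['-']) :: goA (rest.drop 1)
    else if [c] ∈ action_atoms then
      ([c] ++ ['-']) :: goA rest
    else
      goA rest
  termination_by cs => cs.length
  decreasing_by
    all_goals simp

-- ''.join(result).rstrip('-'): join, then drop trailing '-' characters (exact port of str.rstrip('-'))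
def rstripDash (cs : List Char) : List Char :=
  ((cs.reverse).dropWhile (· == '-')).reverse

def insert_hyphens (key : String) : String :=
  String.mk (rstripDash (PySem.Chars.join [] (goA key.toList)))

-- ===== PORT B =====
-- loop body of Source B; tokens kept most-recent-first (Python's append/tokens[-1] act on the end,
-- here on the head), reversed before the join
def stepB (st : List (List Char) × Int) (ic : Int × Char) : List (List Char) × Int :=
  let tokens := st.1
  let last := st.2
  let i := ic.1
  let c := ic.2
  if c == 's' && (i - 1 == last) then
    -- tokens[-1] += 's'  (tokens is provably nonempty here; [] case unreachable)
    (match tokens with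
     | t :: ts => (t ++ ['s']) :: ts
     | [] => [], last)
  else if c == 'm' || c == 'r' || c == 'l' || c == 'b' then
    (([c]) :: tokens, if c == 'r' || c == 'l' then i else last)
  else
    (tokens, last)

def insert_hyphens_alt (key : String) : String :=
  String.mk (PySem.Chars.join ['-'] (((PySem.List.enumerate key.toList 0).foldl stepB ([], -2)).1.reverse))

-- ===== PRECONDITION & SPEC =====
def Spec_insert_hyphens (key : String) (out : String) : Prop := out = insert_hyphens_alt key
instance (key : String) (out : String) : Decidable (Spec_insert_hyphens key out) := by unfold Spec_insert_hyphens; infer_instance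

-- ===== CLAIM (what is proved, stated in full; the proofs are below) =====
def Claim_equal_insert_hyphens : Prop := ∀ (key : String), Dom_insert_hyphens key → Spec_insert_hyphens key (insert_hyphens key)

-- ===== LEMMAS AND PROOFS =====

def T : List Char → List (List Char)
  | [] => []
  | [c] => if c = 'm' ∨ c = 'r' ∨ c = 'l' ∨ c = 'b' then [[c]] else []
  | c :: c2 :: rest =>
    if (c = 'r' ∨ c = 'l') ∧ c2 = 's' then [c, 's'] :: T rest
    else if c = 'm' ∨ c = 'r' ∨ c = 'l' ∨ c = 'b' then [c] :: T (c2 :: rest)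
    else T (c2 :: rest)

theorem goA_eq_T_aux : ∀ (n : Nat) (cs : List Char), cs.length ≤ n → goA cs = (T cs).map (· ++ ['-']) := by
  intro n
  induction n with
  | zero =>
      intro cs h
      have : cs = [] := by cases cs <;> simp_all
      subst this; simp [goA, T]
  | succ n ih =>
      intro cs h
      match cs with
      | [] => simp [goA, T]
      | [c] =>
          simp only [goA, T, action_atoms, List.take_nil, List.drop_nil, List.mem_cons]
          split_ifs <;> simp_all
      | c :: c2 :: rest =>
          have ih1 : goA rest = (T rest).map (· ++ ['-']) := ih rest (by simp at h ⊢; omega)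
          have ih2 : goA (c2 :: rest) = (T (c2 :: rest)).map (· ++ ['-']) := ih (c2 :: rest) (by simp at h ⊢; omega)
          rw [goA]
          simp only [List.take_succ_cons, List.take_zero, List.drop_succ_cons, List.drop_zero]
          by_cases h1 : (c = 'r' ∨ c = 'l') ∧ c2 = 's'
          · have hm : [c, c2] ∈ action_atoms := by
              rcases h1 with ⟨h', rfl⟩; rcases h' with rfl | rfl <;> simp [action_atoms]
            rw [if_pos hm]
            simp only [T, if_pos h1, List.map_cons, List.cons.injEq]
            refine ⟨?_, ih1⟩
            rcases h1 with ⟨_, rfl⟩; rfl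
          · have h2 : [c, c2] ∉ action_atoms := by
              intro hmem
              apply h1
              simp [action_atoms] at hmem
              rcases hmem with ⟨rfl, rfl⟩ | ⟨rfl, rfl⟩
              · exact ⟨Or.inl rfl, rfl⟩
              · exact ⟨Or.inr rfl, rfl⟩
            rw [if_neg h2]
            by_cases h3 : c = 'm' ∨ c = 'r' ∨ c = 'l' ∨ c = 'b'
            · rw [if_pos (by rcases h3 with rfl|rfl|rfl|rfl <;> simp [action_atoms])]
              simp only [T, if_neg h1, if_pos h3, List.map_cons, List.cons.injEq]
              exact ⟨trivial, ih2⟩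
            · rw [if_neg (by simp [action_atoms]; push Not at h3; simp_all)]
              simp only [T, if_neg h1, if_neg h3]
              exact ih2

theorem goA_eq_T (cs : List Char) : goA cs = (T cs).map (· ++ ['-']) :=
  goA_eq_T_aux cs.length cs le_rfl

theorem tokens_ok_aux : ∀ (n : Nat) (cs : List Char), cs.length ≤ n → ∀ t ∈ T cs, t ≠ [] ∧ '-' ∉ t := by
  intro n
  induction n with
  | zero =>
      intro cs h
      have : cs = [] := by cases cs <;> simp_all
      subst this; simp [T]
  | succ n ih =>
      intro cs h
      match cs with
      | [] => simp [T]
      | [c] =>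
          simp only [T]
          split_ifs with hc
          · intro t ht
            simp at ht; subst ht
            rcases hc with rfl|rfl|rfl|rfl <;> simp
          · simp
      | c :: c2 :: rest =>
          simp only [T]
          split_ifs with h1 h3
          · intro t ht
            simp at ht
            rcases ht with rfl | ht
            · rcases h1.1 with rfl | rfl <;> simp
            · exact ih rest (by simp at h ⊢; omega) t ht
          · intro t ht
            simp at ht
            rcases ht with rfl | ht
            · rcases h3 with rfl|rfl|rfl|rfl <;> simp
            · exact ih (c2 :: rest) (by simp at h ⊢; omega) t ht
          · exact ih (c2 :: rest) (by simp at h ⊢; omega)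

theorem tokens_ok (cs : List Char) : ∀ t ∈ T cs, t ≠ [] ∧ '-' ∉ t :=
  tokens_ok_aux cs.length cs le_rfl

theorem rstripDash_append (a b : List Char) (hb : rstripDash b ≠ []) :
    rstripDash (a ++ b) = a ++ rstripDash b := by
  unfold rstripDash at *
  rw [List.reverse_append, List.dropWhile_append]
  split_ifs with h
  · exfalso
    apply hb
    simp [List.dropWhile_eq_nil_iff] at h ⊢
    intro x hx; exact h x hx
  · simp

theorem rstripDash_app_dash (t : List Char) (h : '-' ∉ t) : rstripDash (t ++ ['-']) = t := by
  unfold rstripDash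
  simp only [List.reverse_append, List.reverse_singleton, List.singleton_append,
    List.dropWhile_cons]
  simp only [beq_self_eq_true, if_pos]
  rw [List.dropWhile_eq_self_iff.2, List.reverse_reverse]
  intro hl hp
  have hmem := List.getElem_mem hl
  have heq : t.reverse[0] = '-' := by simpa using hp
  rw [heq, List.mem_reverse] at hmem
  exact h hmem

theorem rstrip_join : ∀ ts : List (List Char), (∀ t ∈ ts, t ≠ [] ∧ '-' ∉ t) →
    rstripDash (PySem.Chars.join [] (ts.map (· ++ ['-']))) = PySem.Chars.join ['-'] ts := by
  intro ts
  induction ts with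
  | nil => intro _; simp [PySem.Chars.join, rstripDash, List.intercalate]
  | cons t ts ih =>
      intro h
      match ts with
      | [] =>
          simp only [List.map_cons, List.map_nil, PySem.Chars.join_singleton]
          exact rstripDash_app_dash t (h t (by simp)).2
      | t2 :: ts' =>
          simp only [List.map_cons, PySem.Chars.join_cons_cons, List.append_nil]
          have hrec := ih (fun u hu => h u (by simp [hu]))
          simp only [List.map_cons] at hrec
          rw [rstripDash_append _ _ ?hb, hrec]
          case hb =>
            rw [hrec]
            rcases ts' with _ | ⟨t3, ts''⟩
            · rw [PySem.Chars.join_singleton]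
              exact (h t2 (by simp)).1
            · rw [PySem.Chars.join_cons_cons]
              simp

def S : Bool → List Char → List (List Char) → List (List Char)
  | _, [], acc => acc
  | prev, c :: rest, acc =>
    if c = 's' ∧ prev then
      S false rest (match acc with | t :: ts => (t ++ ['s']) :: ts | [] => [])
    else if c = 'm' ∨ c = 'r' ∨ c = 'l' ∨ c = 'b' then
      S (c = 'r' ∨ c = 'l') rest ([c] :: acc)
    else
      S false rest acc

theorem S_cons (prev : Bool) (c : Char) (rest : List Char) (acc : List (List Char)) :
    S prev (c :: rest) acc =
      (if c = 's' ∧ prev then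
        S false rest (match acc with | t :: ts => (t ++ ['s']) :: ts | [] => [])
      else if c = 'm' ∨ c = 'r' ∨ c = 'l' ∨ c = 'b' then
        S (c = 'r' ∨ c = 'l') rest ([c] :: acc)
      else
        S false rest acc) := by
  rfl

theorem foldB_eq_S : ∀ (cs : List Char) (i : Int) (acc : List (List Char)) (L : Int), L < i →
    ((PySem.List.enumerate cs i).foldl stepB (acc, L)).1 = S (decide (L = i - 1)) cs acc := by
  intro cs
  induction cs with
  | nil => intro i acc L _; simp [PySem.List.enumerate_nil, S]
  | cons c rest ih =>
      intro i acc L hL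
      rw [PySem.List.enumerate_cons, List.foldl_cons, S_cons]
      by_cases hs : c = 's' ∧ L = i - 1
      · have hstep : stepB (acc, L) (i, c) =
            (match acc with | t :: ts => (t ++ ['s']) :: ts | [] => [], L) := by
          simp [stepB, hs.1, hs.2]
        rw [hstep, if_pos ⟨hs.1, by simp [hs.2]⟩, ih (i + 1) _ L (by omega)]
        have : decide (L = i + 1 - 1) = false := by simp; omega
        rw [this]
      · have hs' : ¬ (c = 's' ∧ (decide (L = i - 1)) = true) := fun h => hs ⟨h.1, by simpa using h.2⟩
        rw [if_neg hs']
        by_cases hc : c = 'm' ∨ c = 'r' ∨ c = 'l' ∨ c = 'b'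
        · rw [if_pos hc]
          by_cases hrl : c = 'r' ∨ c = 'l'
          · have hstep : stepB (acc, L) (i, c) = (([c]) :: acc, i) := by
              rcases hrl with rfl | rfl <;> simp [stepB]
            rw [hstep, ih (i + 1) _ i (by omega)]
            have h1 : decide ((i : Int) = i + 1 - 1) = true := by simp
            have h2 : decide (c = 'r' ∨ c = 'l') = true := by simpa using hrl
            rw [h1, h2]
          · have hstep : stepB (acc, L) (i, c) = (([c]) :: acc, L) := by
              have : ¬ (c = 'r' ∨ c = 'l') := hrl
              rcases hc with rfl|rfl|rfl|rfl <;> simp_all [stepB]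
            rw [hstep, ih (i + 1) _ L (by omega)]
            have h1 : decide (L = i + 1 - 1) = false := by simp; omega
            have h2 : decide (c = 'r' ∨ c = 'l') = false := by simpa using hrl
            rw [h1, h2]
        · rw [if_neg hc]
          have hstep : stepB (acc, L) (i, c) = (acc, L) := by
            have h1 : (c == 'm') = false ∧ (c == 'r') = false ∧ (c == 'l') = false ∧ (c == 'b') = false := by
              push Not at hc
              simp_all
            by_cases hcs : c = 's'
            · subst hcs
              have hne : L ≠ i - 1 := fun hh => hs ⟨rfl, hh⟩
              have : (((i : Int) - 1 == L)) = false := by rw [beq_eq_false_iff_ne]; omega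
              simp [stepB, this, h1]
            · have : (c == 's') = false := by simpa using hcs
              simp [stepB, this, h1]
          rw [hstep, ih (i + 1) _ L (by omega)]
          have h1 : decide (L = i + 1 - 1) = false := by simp; omega
          rw [h1]

theorem S_eq_T_aux : ∀ n : Nat,
    (∀ cs : List Char, cs.length ≤ n → ∀ acc, S false cs acc = (T cs).reverse ++ acc) ∧
    (∀ cs : List Char, cs.length ≤ n → ∀ (c : Char) acc, (c = 'r' ∨ c = 'l') →
      S true cs ([c] :: acc) = (T (c :: cs)).reverse ++ acc) := by
  intro n
  induction n with
  | zero =>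
      constructor
      · intro cs h acc
        have : cs = [] := by cases cs <;> simp_all
        subst this; simp [S, T]
      · intro cs h c acc hc
        have : cs = [] := by cases cs <;> simp_all
        subst this
        simp only [S, T]
        rw [if_pos (by tauto)]
        simp
  | succ n ih =>
      obtain ⟨ihP, ihQ⟩ := ih
      constructor
      · intro cs h acc
        match cs with
        | [] => simp [S, T]
        | c :: rest =>
          have hlen : rest.length ≤ n := by simp at h; omega
          rw [S_cons, if_neg (by simp)]
          by_cases hc : c = 'm' ∨ c = 'r' ∨ c = 'l' ∨ c = 'b'
          · rw [if_pos hc]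
            by_cases hrl : c = 'r' ∨ c = 'l'
            · have : decide (c = 'r' ∨ c = 'l') = true := by simpa using hrl
              rw [this, ihQ rest hlen c acc hrl]
            · have : decide (c = 'r' ∨ c = 'l') = false := by simpa using hrl
              rw [this, ihP rest hlen]
              -- T (c :: rest) = [c] :: T rest for c ∈ {m, b}
              have hT : T (c :: rest) = [c] :: T rest := by
                match rest with
                | [] => simp only [T]; rw [if_pos hc]
                | c2 :: r2 =>
                  simp only [T]
                  rw [if_neg (by rintro ⟨h1, h2⟩; exact hrl h1), if_pos hc]
              rw [hT]
              simp
          · rw [if_neg hc, ihP rest hlen]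
            have hT : T (c :: rest) = T rest := by
              match rest with
              | [] => simp only [T]; rw [if_neg hc]
              | c2 :: r2 =>
                simp only [T]
                rw [if_neg (by rintro ⟨h1, h2⟩; exact hc (by tauto)), if_neg hc]
            rw [hT]
      · intro cs h c acc hrl
        have hc : c = 'm' ∨ c = 'r' ∨ c = 'l' ∨ c = 'b' := by tauto
        match cs with
        | [] =>
          simp only [S, T]
          rw [if_pos hc]
          simp
        | c2 :: rest =>
          have hlen : rest.length ≤ n := by simp at h; omega
          have hlen2 : (c2 :: rest).length ≤ n + 1 := h
          by_cases hs : c2 = 's'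
          · subst hs
            rw [S_cons, if_pos ⟨rfl, rfl⟩]
            have hT : T (c :: 's' :: rest) = [c, 's'] :: T rest := by
              simp only [T]
              rw [if_pos ⟨hrl, trivial⟩]
            rw [hT, ihP rest hlen]
            simp
          · rw [S_cons, if_neg (by rintro ⟨h1, _⟩; exact hs h1)]
            have hT : T (c :: c2 :: rest) = [c] :: T (c2 :: rest) := by
              simp only [T]
              rw [if_neg (by rintro ⟨_, h2⟩; exact hs h2), if_pos hc]
            rw [hT]
            by_cases hc2 : c2 = 'm' ∨ c2 = 'r' ∨ c2 = 'l' ∨ c2 = 'b'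
            · rw [if_pos hc2]
              by_cases hrl2 : c2 = 'r' ∨ c2 = 'l'
              · have : decide (c2 = 'r' ∨ c2 = 'l') = true := by simpa using hrl2
                rw [this, ihQ rest hlen c2 ([c] :: acc) hrl2]
                simp
              · have : decide (c2 = 'r' ∨ c2 = 'l') = false := by simpa using hrl2
                rw [this, ihP rest hlen]
                have hT2 : T (c2 :: rest) = [c2] :: T rest := by
                  match rest with
                  | [] => simp only [T]; rw [if_pos hc2]
                  | c3 :: r3 =>
                    simp only [T]
                    rw [if_neg (by rintro ⟨h1, _⟩; exact hrl2 h1), if_pos hc2]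
                rw [hT2]
                simp
            · rw [if_neg hc2, ihP rest hlen]
              have hT2 : T (c2 :: rest) = T rest := by
                match rest with
                | [] => simp only [T]; rw [if_neg hc2]
                | c3 :: r3 =>
                  simp only [T]
                  rw [if_neg (by rintro ⟨h1, _⟩; exact hc2 (by tauto)), if_neg hc2]
              rw [hT2]
              simp

theorem S_eq_T (cs : List Char) (acc : List (List Char)) : S false cs acc = (T cs).reverse ++ acc :=
  (S_eq_T_aux cs.length).1 cs le_rfl acc

-- ===== VERDICT (by name: the statement is the Claim_ definition above) =====
theorem insert_hyphens_spec : Claim_equal_insert_hyphens := by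
  intro key _
  unfold Spec_insert_hyphens insert_hyphens insert_hyphens_alt
  rw [goA_eq_T, rstrip_join _ (tokens_ok _)]
  have hB := foldB_eq_S key.toList 0 [] (-2) (by norm_num)
  norm_num at hB
  rw [hB, S_eq_T]
  simp
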